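-- pv_equiv track=rewrite | github.com/omarYasserMohamed/nutrition-app | nutritionApp.py | toXBelong
-- ===== SOURCE A (Python) =====
-- protienSource = ['b#N:eggs#C:0.6#F:5#P:6#K:78','b#N:greekYoghurt#C:7.2#F:9#P:15#K:170','b#N:skimmedMilk#C:9#F:1#P:6#K:65','o#N:tilapia#C:2#F:1.7#P:26#K:128','o#N:chickenB#C:0#F:3.6#P:30#K:165','o#N:chickenT#C:0#F:11#P:26#K:209' , 'o#N:tunaCan#C:1#F:2#P:25#K:123','o#N:CottageCheese#C:3.4#F:4.3#P:11#K:99', 'o#N:Greeyo#C:2#F:0.3#P:9#K:45']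
--
-- fatSource = ['b#N:cashew#C:30#F:44#P:18#K:5', 'b#N:peanutButter#C:6#F:16#P:8#K:190', 'b#N:pistachio#C:28#F:45#P:20#K:6' , 'b#N:almond#C:22#F:49#P:21#K:6']
--
-- carbSource = ['b#N:oats#C:65.7#F:8#P:13#K:392' , 'o#N:whiteRice#C:79#F:0.6#P:7#K:360' , 'o#N:brownRice#C:76#F:2.7#P:8#K:362' , 'o#N:basmatiRice#C:80#F:1#P:7#K:90' , 'b#N:honey#C:17#F:0#P:0#K:64']
--
-- vegetables = ['o#N:cucumber#C:0#F:0#P:0#K:16', 'o#N:tomato#C:0#F:0#P:0#K:24', 'o#N:cannedMushroom#C:0#F:0#P:0#K:38' , 'o#N:onion#C:0#F:0#P:0#K:44']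
--
-- fruits = ['o#N:apple#C:25#F:0.3#P:0.5#K:95' , 'o#N:guava#C:24#F:1.6#P:4.2#K:110' ,'o#N:peach#C:15#F:0#P:1.4#K:70' , 'o#N:oranges#C:15#F:0.2#P:1.2#K:62' , 'o#N:orangeJuice#C:28#F:0#P:1#K:110' , 'b#N:avocado#C:4#F:15#P:2#K:168']
--
-- def getName(x):
-- 	i = 0
-- 	flag = False
-- 	out = ''
-- 	while i < len(x):
-- 		if(x[i] == 'N' and x[i+1] == ':'):
-- 			flag = True
-- 			i = i+2
-- 		else:
-- 			i = i+1
-- 		if(flag == True):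
-- 			if(x[i] != '#'):
-- 				out = out + x[i]
-- 			else:
-- 				break
-- 	return out
--
-- def toXBelong(x):
-- 	i = 0
-- 	while i < len(protienSource):
-- 		if(x == getName(protienSource[i])):
-- 			return 'P'
-- 		i = i+1
-- 	i = 0
-- 	while i < len(fatSource):
-- 		if(x == getName(fatSource[i])):
-- 			return 'F'
-- 		i = i+1
-- 	i = 0
-- 	while i < len(carbSource):
-- 		if(x == getName(carbSource[i])):
-- 			return 'C'
-- 		i = i+1
-- 	i = 0
-- 	while i < len(protienSource):
-- 		if(x == getName(protienSource[i])):
-- 			return 'P'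
-- 		i = i+1
-- 	i = 0
-- 	while i < len(vegetables):
-- 		if(x == getName(vegetables[i])):
-- 			return 'V'
-- 		i = i+1
-- 	i = 0
-- 	while i < len(fruits):
-- 		if(x == getName(fruits[i])):
-- 			return 'Fr'
-- 		i = i+1
-- 	return 'X'
-- ===== SOURCE B (Python) =====
-- protienSource = ['b#N:eggs#C:0.6#F:5#P:6#K:78','b#N:greekYoghurt#C:7.2#F:9#P:15#K:170','b#N:skimmedMilk#C:9#F:1#P:6#K:65','o#N:tilapia#C:2#F:1.7#P:26#K:128','o#N:chickenB#C:0#F:3.6#P:30#K:165','o#N:chickenT#C:0#F:11#P:26#K:209' , 'o#N:tunaCan#C:1#F:2#P:25#K:123','o#N:CottageCheese#C:3.4#F:4.3#P:11#K:99', 'o#N:Greeyo#C:2#F:0.3#P:9#K:45']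
--
-- fatSource = ['b#N:cashew#C:30#F:44#P:18#K:5', 'b#N:peanutButter#C:6#F:16#P:8#K:190', 'b#N:pistachio#C:28#F:45#P:20#K:6' , 'b#N:almond#C:22#F:49#P:21#K:6']
--
-- carbSource = ['b#N:oats#C:65.7#F:8#P:13#K:392' , 'o#N:whiteRice#C:79#F:0.6#P:7#K:360' , 'o#N:brownRice#C:76#F:2.7#P:8#K:362' , 'o#N:basmatiRice#C:80#F:1#P:7#K:90' , 'b#N:honey#C:17#F:0#P:0#K:64']
--
-- vegetables = ['o#N:cucumber#C:0#F:0#P:0#K:16', 'o#N:tomato#C:0#F:0#P:0#K:24', 'o#N:cannedMushroom#C:0#F:0#P:0#K:38' , 'o#N:onion#C:0#F:0#P:0#K:44']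
--
-- fruits = ['o#N:apple#C:25#F:0.3#P:0.5#K:95' , 'o#N:guava#C:24#F:1.6#P:4.2#K:110' ,'o#N:peach#C:15#F:0#P:1.4#K:70' , 'o#N:oranges#C:15#F:0.2#P:1.2#K:62' , 'o#N:orangeJuice#C:28#F:0#P:1#K:110' , 'b#N:avocado#C:4#F:15#P:2#K:168']
--
-- _CATEGORIES = (('P', protienSource), ('F', fatSource), ('C', carbSource),
--                ('V', vegetables), ('Fr', fruits))
--
-- def toXBelong(x):
-- 	# A record matches name x exactly when it contains the field '#N:<x>#';
-- 	# names never contain '#', so an x containing '#' matches nothing.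
-- 	if '#' in x:
-- 		return 'X'
-- 	pat = '#N:' + x + '#'
-- 	for tag, entries in _CATEGORIES:
-- 		if any(pat in e for e in entries):
-- 			return tag
-- 	return 'X'
-- ===== Notes on version B (the rewrite author's own statement) =====
-- stated objective: simpler
-- what changed: B never parses names out of the records: it searches each raw record for the literal field pattern '#N:'+x+'#' (after rejecting x containing '#', which no name can contain), replacing A's getName extraction loop and six index-while scans with a plain substring test per record.
import Mathlib
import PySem

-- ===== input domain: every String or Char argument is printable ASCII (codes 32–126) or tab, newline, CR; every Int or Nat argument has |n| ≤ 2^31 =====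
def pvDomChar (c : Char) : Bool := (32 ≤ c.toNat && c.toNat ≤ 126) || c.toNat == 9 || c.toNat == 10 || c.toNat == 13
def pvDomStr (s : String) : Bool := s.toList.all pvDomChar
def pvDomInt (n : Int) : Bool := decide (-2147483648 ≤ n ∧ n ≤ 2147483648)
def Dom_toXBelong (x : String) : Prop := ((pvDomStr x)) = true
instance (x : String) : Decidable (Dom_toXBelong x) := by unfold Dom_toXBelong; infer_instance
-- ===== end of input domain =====

-- B drops A's getName parsing entirely: it searches each raw record for the literal field
-- pattern '#N:'+x+'#' (rejecting x that contains '#', which no name can); objective: simpler.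

-- ===== PORT A =====
def protienSource : List String := ["b#N:eggs#C:0.6#F:5#P:6#K:78","b#N:greekYoghurt#C:7.2#F:9#P:15#K:170","b#N:skimmedMilk#C:9#F:1#P:6#K:65","o#N:tilapia#C:2#F:1.7#P:26#K:128","o#N:chickenB#C:0#F:3.6#P:30#K:165","o#N:chickenT#C:0#F:11#P:26#K:209","o#N:tunaCan#C:1#F:2#P:25#K:123","o#N:CottageCheese#C:3.4#F:4.3#P:11#K:99","o#N:Greeyo#C:2#F:0.3#P:9#K:45"]
def fatSource : List String := ["b#N:cashew#C:30#F:44#P:18#K:5","b#N:peanutButter#C:6#F:16#P:8#K:190","b#N:pistachio#C:28#F:45#P:20#K:6","b#N:almond#C:22#F:49#P:21#K:6"]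
def carbSource : List String := ["b#N:oats#C:65.7#F:8#P:13#K:392","o#N:whiteRice#C:79#F:0.6#P:7#K:360","o#N:brownRice#C:76#F:2.7#P:8#K:362","o#N:basmatiRice#C:80#F:1#P:7#K:90","b#N:honey#C:17#F:0#P:0#K:64"]
def vegetables : List String := ["o#N:cucumber#C:0#F:0#P:0#K:16","o#N:tomato#C:0#F:0#P:0#K:24","o#N:cannedMushroom#C:0#F:0#P:0#K:38","o#N:onion#C:0#F:0#P:0#K:44"]
def fruits : List String := ["o#N:apple#C:25#F:0.3#P:0.5#K:95","o#N:guava#C:24#F:1.6#P:4.2#K:110","o#N:peach#C:15#F:0#P:1.4#K:70","o#N:oranges#C:15#F:0.2#P:1.2#K:62","o#N:orangeJuice#C:28#F:0#P:1#K:110","b#N:avocado#C:4#F:15#P:2#K:168"]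

-- getName's while loop, step for step (state i, flag, out; getName is only ever applied to the
-- constant entries above, all of which contain "N:...#", so the in-range List.getD reads are exact).
-- fuel = cs.length bounds the number of iterations (i grows by at least 1 per turn), so the
-- fuel-0 branch is never reached while i < len: the loop body is replayed exactly.
def getNameGo (cs : List Char) : Nat → Nat → Bool → List Char → List Char
  | 0, _, _, out => out
  | fuel + 1, i, flag, out =>
    if i < cs.length then
      let p := (cs.getD i ' ' == 'N') && (cs.getD (i+1) ' ' == ':')
      let i' := if p then i + 2 else i + 1
      let flag' := if p then true else flag
      if flag' then
        if cs.getD i' '#' ≠ '#' then getNameGo cs fuel i' flag' (out ++ [cs.getD i' '#'])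
        else out  -- break
      else getNameGo cs fuel i' flag' out
    else out

def getName (x : String) : String := String.ofList (getNameGo x.toList x.toList.length 0 false [])

-- one of A's index-based while scans: "while i < len(l): if x == getName(l[i]): return True; i += 1"
def scanA (x : String) : List String → Bool
  | [] => false
  | s :: rest => if x == getName s then true else scanA x rest

def toXBelong (x : String) : String :=
  if scanA x protienSource then "P"
  else if scanA x fatSource then "F"
  else if scanA x carbSource then "C"
  else if scanA x protienSource then "P"   -- A scans the protein list a second time
  else if scanA x vegetables then "V"
  else if scanA x fruits then "Fr"
  else "X"

-- ===== PORT B =====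
-- the (tag, source list) tuple B iterates over
def catList : List (String × List String) := [("P", protienSource), ("F", fatSource), ("C", carbSource), ("V", vegetables), ("Fr", fruits)]

-- B's for loop with early return: first category whose records contain the pattern
def scanCats (pat : String) : List (String × List String) → String
  | [] => "X"
  | (tag, entries) :: rest =>
    if entries.any (fun e => PySem.Str.isIn pat e) then tag else scanCats pat rest

def toXBelong_alt (x : String) : String :=
  if PySem.Str.isIn "#" x then "X"
  else scanCats ("#N:" ++ x ++ "#") catList

-- ===== PRECONDITION & SPEC =====
def Spec_toXBelong (x : String) (out : String) : Prop := out = toXBelong_alt x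
instance (x : String) (out : String) : Decidable (Spec_toXBelong x out) := by unfold Spec_toXBelong; infer_instance

-- ===== CLAIM (what is proved, stated in full; the proofs are below) =====
def Claim_equal_toXBelong : Prop := ∀ (x : String), Dom_toXBelong x → Spec_toXBelong x (toXBelong x)

-- ===== LEMMAS AND PROOFS =====

-- a list splits uniquely at the FIRST occurrence of an element
lemma split_first_eq {α : Type} [DecidableEq α] (c : α) :
    ∀ (u1 v1 u2 v2 : List α), u1 ++ c :: v1 = u2 ++ c :: v2 → c ∉ u1 → c ∉ u2 → u1 = u2 ∧ v1 = v2 := by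
  intro u1
  induction u1 with
  | nil =>
    intro v1 u2 v2 h _ hu2
    cases u2 with
    | nil => simpa using h
    | cons d u2' =>
      exfalso; apply hu2
      have : c = d := by simpa using congrArg (fun l => l.headD c) h
      simp [this]
  | cons d u1' ih =>
    intro v1 u2 v2 h hu1 hu2
    cases u2 with
    | nil =>
      exfalso; apply hu1
      have : d = c := by simpa using congrArg (fun l => l.headD c) h
      simp [this]
    | cons d2 u2' =>
      have hd : d = d2 := by simpa using congrArg (fun l => l.headD c) h
      have ht : u1' ++ c :: v1 = u2' ++ c :: v2 := by
        subst hd; simpa using congrArg List.tail h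
      obtain ⟨h1, h2⟩ := ih v1 u2' v2 ht (fun hm => hu1 (List.mem_cons_of_mem _ hm)) (fun hm => hu2 (List.mem_cons_of_mem _ hm))
      exact ⟨by rw [hd, h1], h2⟩

-- the pattern '#N:' ++ x ++ '#' occurs in a record a ++ '#N:' ++ n ++ '#' ++ b exactly for x = n,
-- provided 'N' occurs nowhere but in the marker and '#' occurs in neither x nor n
lemma pat_infix_iff (x a n b : List Char) (hx : '#' ∉ x) (hn : '#' ∉ n)
    (hNa : 'N' ∉ a) (hNn : 'N' ∉ n) (hNb : 'N' ∉ b) :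
    (('#'::'N'::':':: (x ++ ['#'])) <:+: (a ++ '#'::'N'::':':: (n ++ '#' :: b))) ↔ x = n := by
  constructor
  · rintro ⟨s, t, h⟩
    have hNs : 'N' ∉ s := by
      intro hmem
      have hc := congrArg (List.count 'N') h
      have h1 : 0 < List.count 'N' s := List.count_pos_iff.mpr hmem
      have h2 : List.count 'N' a = 0 := List.count_eq_zero.mpr hNa
      have h3 : List.count 'N' n = 0 := List.count_eq_zero.mpr hNn
      have h4 : List.count 'N' b = 0 := List.count_eq_zero.mpr hNb
      simp [List.count_append, h2, h3, h4] at hc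
      omega
    have h2 : (s ++ ['#']) ++ 'N' :: (':' :: (x ++ '#' :: t)) = (a ++ ['#']) ++ 'N' :: (':' :: (n ++ '#' :: b)) := by
      simpa [List.append_assoc] using h
    obtain ⟨-, h3⟩ := split_first_eq 'N' (s ++ ['#']) _ (a ++ ['#']) _ h2 (by simp [hNs]) (by simp [hNa])
    have h4 : x ++ '#' :: t = n ++ '#' :: b := by simpa using h3
    exact (split_first_eq '#' x _ n _ h4 hx hn).1
  · rintro rfl
    exact ⟨a, b, by simp [List.append_assoc]⟩

-- per-record form: the substring test equals the name comparison
lemma entry_isIn (x : String) (hx : '#' ∉ x.toList) (a n b : List Char) (e nm : String)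
    (he : e.toList = a ++ '#'::'N'::':':: (n ++ '#' :: b)) (hnm : nm.toList = n)
    (hn : '#' ∉ n) (hNa : 'N' ∉ a) (hNn : 'N' ∉ n) (hNb : 'N' ∉ b) :
    PySem.Str.isIn ("#N:" ++ x ++ "#") e = (x == nm) := by
  have hpat : ("#N:" ++ x ++ "#").toList = '#'::'N'::':':: (x.toList ++ ['#']) := by simp
  have key : PySem.Str.isIn ("#N:" ++ x ++ "#") e = true ↔ x = nm := by
    rw [PySem.Str.isIn_iff_infix, hpat, he,
        pat_infix_iff x.toList a n b hx hn hNa hNn hNb, ← hnm]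
    exact ⟨fun h => String.toList_inj.mp h, fun h => by rw [h]⟩
  cases hb : (x == nm) with
  | true => exact key.mpr (by simpa using hb)
  | false =>
    rw [Bool.eq_false_iff]
    intro hcon
    have : x = nm := key.mp hcon
    simp [this] at hb

set_option maxRecDepth 8192 in
lemma gn1 : getName "b#N:eggs#C:0.6#F:5#P:6#K:78" = "eggs" := by decide
set_option maxRecDepth 8192 in
lemma gn2 : getName "b#N:greekYoghurt#C:7.2#F:9#P:15#K:170" = "greekYoghurt" := by decide
set_option maxRecDepth 8192 in
lemma gn3 : getName "b#N:skimmedMilk#C:9#F:1#P:6#K:65" = "skimmedMilk" := by decide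
set_option maxRecDepth 8192 in
lemma gn4 : getName "o#N:tilapia#C:2#F:1.7#P:26#K:128" = "tilapia" := by decide
set_option maxRecDepth 8192 in
lemma gn5 : getName "o#N:chickenB#C:0#F:3.6#P:30#K:165" = "chickenB" := by decide
set_option maxRecDepth 8192 in
lemma gn6 : getName "o#N:chickenT#C:0#F:11#P:26#K:209" = "chickenT" := by decide
set_option maxRecDepth 8192 in
lemma gn7 : getName "o#N:tunaCan#C:1#F:2#P:25#K:123" = "tunaCan" := by decide
set_option maxRecDepth 8192 in
lemma gn8 : getName "o#N:CottageCheese#C:3.4#F:4.3#P:11#K:99" = "CottageCheese" := by decide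
set_option maxRecDepth 8192 in
lemma gn9 : getName "o#N:Greeyo#C:2#F:0.3#P:9#K:45" = "Greeyo" := by decide
set_option maxRecDepth 8192 in
lemma gn10 : getName "b#N:cashew#C:30#F:44#P:18#K:5" = "cashew" := by decide
set_option maxRecDepth 8192 in
lemma gn11 : getName "b#N:peanutButter#C:6#F:16#P:8#K:190" = "peanutButter" := by decide
set_option maxRecDepth 8192 in
lemma gn12 : getName "b#N:pistachio#C:28#F:45#P:20#K:6" = "pistachio" := by decide
set_option maxRecDepth 8192 in
lemma gn13 : getName "b#N:almond#C:22#F:49#P:21#K:6" = "almond" := by decide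
set_option maxRecDepth 8192 in
lemma gn14 : getName "b#N:oats#C:65.7#F:8#P:13#K:392" = "oats" := by decide
set_option maxRecDepth 8192 in
lemma gn15 : getName "o#N:whiteRice#C:79#F:0.6#P:7#K:360" = "whiteRice" := by decide
set_option maxRecDepth 8192 in
lemma gn16 : getName "o#N:brownRice#C:76#F:2.7#P:8#K:362" = "brownRice" := by decide
set_option maxRecDepth 8192 in
lemma gn17 : getName "o#N:basmatiRice#C:80#F:1#P:7#K:90" = "basmatiRice" := by decide
set_option maxRecDepth 8192 in
lemma gn18 : getName "b#N:honey#C:17#F:0#P:0#K:64" = "honey" := by decide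
set_option maxRecDepth 8192 in
lemma gn19 : getName "o#N:cucumber#C:0#F:0#P:0#K:16" = "cucumber" := by decide
set_option maxRecDepth 8192 in
lemma gn20 : getName "o#N:tomato#C:0#F:0#P:0#K:24" = "tomato" := by decide
set_option maxRecDepth 8192 in
lemma gn21 : getName "o#N:cannedMushroom#C:0#F:0#P:0#K:38" = "cannedMushroom" := by decide
set_option maxRecDepth 8192 in
lemma gn22 : getName "o#N:onion#C:0#F:0#P:0#K:44" = "onion" := by decide
set_option maxRecDepth 8192 in
lemma gn23 : getName "o#N:apple#C:25#F:0.3#P:0.5#K:95" = "apple" := by decide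
set_option maxRecDepth 8192 in
lemma gn24 : getName "o#N:guava#C:24#F:1.6#P:4.2#K:110" = "guava" := by decide
set_option maxRecDepth 8192 in
lemma gn25 : getName "o#N:peach#C:15#F:0#P:1.4#K:70" = "peach" := by decide
set_option maxRecDepth 8192 in
lemma gn26 : getName "o#N:oranges#C:15#F:0.2#P:1.2#K:62" = "oranges" := by decide
set_option maxRecDepth 8192 in
lemma gn27 : getName "o#N:orangeJuice#C:28#F:0#P:1#K:110" = "orangeJuice" := by decide
set_option maxRecDepth 8192 in
lemma gn28 : getName "b#N:avocado#C:4#F:15#P:2#K:168" = "avocado" := by decide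

lemma en1 (x : String) (hx : '#' ∉ x.toList) :
    PySem.Str.isIn ("#N:" ++ x ++ "#") "b#N:eggs#C:0.6#F:5#P:6#K:78" = (x == "eggs") :=
  entry_isIn x hx ['b'] "eggs".toList ['C', ':', '0', '.', '6', '#', 'F', ':', '5', '#', 'P', ':', '6', '#', 'K', ':', '7', '8'] _ _ (by decide) rfl (by decide) (by decide) (by decide) (by decide)

lemma en2 (x : String) (hx : '#' ∉ x.toList) :
    PySem.Str.isIn ("#N:" ++ x ++ "#") "b#N:greekYoghurt#C:7.2#F:9#P:15#K:170" = (x == "greekYoghurt") :=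
  entry_isIn x hx ['b'] "greekYoghurt".toList ['C', ':', '7', '.', '2', '#', 'F', ':', '9', '#', 'P', ':', '1', '5', '#', 'K', ':', '1', '7', '0'] _ _ (by decide) rfl (by decide) (by decide) (by decide) (by decide)

lemma en3 (x : String) (hx : '#' ∉ x.toList) :
    PySem.Str.isIn ("#N:" ++ x ++ "#") "b#N:skimmedMilk#C:9#F:1#P:6#K:65" = (x == "skimmedMilk") :=
  entry_isIn x hx ['b'] "skimmedMilk".toList ['C', ':', '9', '#', 'F', ':', '1', '#', 'P', ':', '6', '#', 'K', ':', '6', '5'] _ _ (by decide) rfl (by decide) (by decide) (by decide) (by decide)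

lemma en4 (x : String) (hx : '#' ∉ x.toList) :
    PySem.Str.isIn ("#N:" ++ x ++ "#") "o#N:tilapia#C:2#F:1.7#P:26#K:128" = (x == "tilapia") :=
  entry_isIn x hx ['o'] "tilapia".toList ['C', ':', '2', '#', 'F', ':', '1', '.', '7', '#', 'P', ':', '2', '6', '#', 'K', ':', '1', '2', '8'] _ _ (by decide) rfl (by decide) (by decide) (by decide) (by decide)

lemma en5 (x : String) (hx : '#' ∉ x.toList) :
    PySem.Str.isIn ("#N:" ++ x ++ "#") "o#N:chickenB#C:0#F:3.6#P:30#K:165" = (x == "chickenB") :=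
  entry_isIn x hx ['o'] "chickenB".toList ['C', ':', '0', '#', 'F', ':', '3', '.', '6', '#', 'P', ':', '3', '0', '#', 'K', ':', '1', '6', '5'] _ _ (by decide) rfl (by decide) (by decide) (by decide) (by decide)

lemma en6 (x : String) (hx : '#' ∉ x.toList) :
    PySem.Str.isIn ("#N:" ++ x ++ "#") "o#N:chickenT#C:0#F:11#P:26#K:209" = (x == "chickenT") :=
  entry_isIn x hx ['o'] "chickenT".toList ['C', ':', '0', '#', 'F', ':', '1', '1', '#', 'P', ':', '2', '6', '#', 'K', ':', '2', '0', '9'] _ _ (by decide) rfl (by decide) (by decide) (by decide) (by decide)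

lemma en7 (x : String) (hx : '#' ∉ x.toList) :
    PySem.Str.isIn ("#N:" ++ x ++ "#") "o#N:tunaCan#C:1#F:2#P:25#K:123" = (x == "tunaCan") :=
  entry_isIn x hx ['o'] "tunaCan".toList ['C', ':', '1', '#', 'F', ':', '2', '#', 'P', ':', '2', '5', '#', 'K', ':', '1', '2', '3'] _ _ (by decide) rfl (by decide) (by decide) (by decide) (by decide)

lemma en8 (x : String) (hx : '#' ∉ x.toList) :
    PySem.Str.isIn ("#N:" ++ x ++ "#") "o#N:CottageCheese#C:3.4#F:4.3#P:11#K:99" = (x == "CottageCheese") :=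
  entry_isIn x hx ['o'] "CottageCheese".toList ['C', ':', '3', '.', '4', '#', 'F', ':', '4', '.', '3', '#', 'P', ':', '1', '1', '#', 'K', ':', '9', '9'] _ _ (by decide) rfl (by decide) (by decide) (by decide) (by decide)

lemma en9 (x : String) (hx : '#' ∉ x.toList) :
    PySem.Str.isIn ("#N:" ++ x ++ "#") "o#N:Greeyo#C:2#F:0.3#P:9#K:45" = (x == "Greeyo") :=
  entry_isIn x hx ['o'] "Greeyo".toList ['C', ':', '2', '#', 'F', ':', '0', '.', '3', '#', 'P', ':', '9', '#', 'K', ':', '4', '5'] _ _ (by decide) rfl (by decide) (by decide) (by decide) (by decide)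

lemma en10 (x : String) (hx : '#' ∉ x.toList) :
    PySem.Str.isIn ("#N:" ++ x ++ "#") "b#N:cashew#C:30#F:44#P:18#K:5" = (x == "cashew") :=
  entry_isIn x hx ['b'] "cashew".toList ['C', ':', '3', '0', '#', 'F', ':', '4', '4', '#', 'P', ':', '1', '8', '#', 'K', ':', '5'] _ _ (by decide) rfl (by decide) (by decide) (by decide) (by decide)

lemma en11 (x : String) (hx : '#' ∉ x.toList) :
    PySem.Str.isIn ("#N:" ++ x ++ "#") "b#N:peanutButter#C:6#F:16#P:8#K:190" = (x == "peanutButter") :=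
  entry_isIn x hx ['b'] "peanutButter".toList ['C', ':', '6', '#', 'F', ':', '1', '6', '#', 'P', ':', '8', '#', 'K', ':', '1', '9', '0'] _ _ (by decide) rfl (by decide) (by decide) (by decide) (by decide)

lemma en12 (x : String) (hx : '#' ∉ x.toList) :
    PySem.Str.isIn ("#N:" ++ x ++ "#") "b#N:pistachio#C:28#F:45#P:20#K:6" = (x == "pistachio") :=
  entry_isIn x hx ['b'] "pistachio".toList ['C', ':', '2', '8', '#', 'F', ':', '4', '5', '#', 'P', ':', '2', '0', '#', 'K', ':', '6'] _ _ (by decide) rfl (by decide) (by decide) (by decide) (by decide)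

lemma en13 (x : String) (hx : '#' ∉ x.toList) :
    PySem.Str.isIn ("#N:" ++ x ++ "#") "b#N:almond#C:22#F:49#P:21#K:6" = (x == "almond") :=
  entry_isIn x hx ['b'] "almond".toList ['C', ':', '2', '2', '#', 'F', ':', '4', '9', '#', 'P', ':', '2', '1', '#', 'K', ':', '6'] _ _ (by decide) rfl (by decide) (by decide) (by decide) (by decide)

lemma en14 (x : String) (hx : '#' ∉ x.toList) :
    PySem.Str.isIn ("#N:" ++ x ++ "#") "b#N:oats#C:65.7#F:8#P:13#K:392" = (x == "oats") :=
  entry_isIn x hx ['b'] "oats".toList ['C', ':', '6', '5', '.', '7', '#', 'F', ':', '8', '#', 'P', ':', '1', '3', '#', 'K', ':', '3', '9', '2'] _ _ (by decide) rfl (by decide) (by decide) (by decide) (by decide)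

lemma en15 (x : String) (hx : '#' ∉ x.toList) :
    PySem.Str.isIn ("#N:" ++ x ++ "#") "o#N:whiteRice#C:79#F:0.6#P:7#K:360" = (x == "whiteRice") :=
  entry_isIn x hx ['o'] "whiteRice".toList ['C', ':', '7', '9', '#', 'F', ':', '0', '.', '6', '#', 'P', ':', '7', '#', 'K', ':', '3', '6', '0'] _ _ (by decide) rfl (by decide) (by decide) (by decide) (by decide)

lemma en16 (x : String) (hx : '#' ∉ x.toList) :
    PySem.Str.isIn ("#N:" ++ x ++ "#") "o#N:brownRice#C:76#F:2.7#P:8#K:362" = (x == "brownRice") :=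
  entry_isIn x hx ['o'] "brownRice".toList ['C', ':', '7', '6', '#', 'F', ':', '2', '.', '7', '#', 'P', ':', '8', '#', 'K', ':', '3', '6', '2'] _ _ (by decide) rfl (by decide) (by decide) (by decide) (by decide)

lemma en17 (x : String) (hx : '#' ∉ x.toList) :
    PySem.Str.isIn ("#N:" ++ x ++ "#") "o#N:basmatiRice#C:80#F:1#P:7#K:90" = (x == "basmatiRice") :=
  entry_isIn x hx ['o'] "basmatiRice".toList ['C', ':', '8', '0', '#', 'F', ':', '1', '#', 'P', ':', '7', '#', 'K', ':', '9', '0'] _ _ (by decide) rfl (by decide) (by decide) (by decide) (by decide)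

lemma en18 (x : String) (hx : '#' ∉ x.toList) :
    PySem.Str.isIn ("#N:" ++ x ++ "#") "b#N:honey#C:17#F:0#P:0#K:64" = (x == "honey") :=
  entry_isIn x hx ['b'] "honey".toList ['C', ':', '1', '7', '#', 'F', ':', '0', '#', 'P', ':', '0', '#', 'K', ':', '6', '4'] _ _ (by decide) rfl (by decide) (by decide) (by decide) (by decide)

lemma en19 (x : String) (hx : '#' ∉ x.toList) :
    PySem.Str.isIn ("#N:" ++ x ++ "#") "o#N:cucumber#C:0#F:0#P:0#K:16" = (x == "cucumber") :=
  entry_isIn x hx ['o'] "cucumber".toList ['C', ':', '0', '#', 'F', ':', '0', '#', 'P', ':', '0', '#', 'K', ':', '1', '6'] _ _ (by decide) rfl (by decide) (by decide) (by decide) (by decide)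

lemma en20 (x : String) (hx : '#' ∉ x.toList) :
    PySem.Str.isIn ("#N:" ++ x ++ "#") "o#N:tomato#C:0#F:0#P:0#K:24" = (x == "tomato") :=
  entry_isIn x hx ['o'] "tomato".toList ['C', ':', '0', '#', 'F', ':', '0', '#', 'P', ':', '0', '#', 'K', ':', '2', '4'] _ _ (by decide) rfl (by decide) (by decide) (by decide) (by decide)

lemma en21 (x : String) (hx : '#' ∉ x.toList) :
    PySem.Str.isIn ("#N:" ++ x ++ "#") "o#N:cannedMushroom#C:0#F:0#P:0#K:38" = (x == "cannedMushroom") :=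
  entry_isIn x hx ['o'] "cannedMushroom".toList ['C', ':', '0', '#', 'F', ':', '0', '#', 'P', ':', '0', '#', 'K', ':', '3', '8'] _ _ (by decide) rfl (by decide) (by decide) (by decide) (by decide)

lemma en22 (x : String) (hx : '#' ∉ x.toList) :
    PySem.Str.isIn ("#N:" ++ x ++ "#") "o#N:onion#C:0#F:0#P:0#K:44" = (x == "onion") :=
  entry_isIn x hx ['o'] "onion".toList ['C', ':', '0', '#', 'F', ':', '0', '#', 'P', ':', '0', '#', 'K', ':', '4', '4'] _ _ (by decide) rfl (by decide) (by decide) (by decide) (by decide)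

lemma en23 (x : String) (hx : '#' ∉ x.toList) :
    PySem.Str.isIn ("#N:" ++ x ++ "#") "o#N:apple#C:25#F:0.3#P:0.5#K:95" = (x == "apple") :=
  entry_isIn x hx ['o'] "apple".toList ['C', ':', '2', '5', '#', 'F', ':', '0', '.', '3', '#', 'P', ':', '0', '.', '5', '#', 'K', ':', '9', '5'] _ _ (by decide) rfl (by decide) (by decide) (by decide) (by decide)

lemma en24 (x : String) (hx : '#' ∉ x.toList) :
    PySem.Str.isIn ("#N:" ++ x ++ "#") "o#N:guava#C:24#F:1.6#P:4.2#K:110" = (x == "guava") :=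
  entry_isIn x hx ['o'] "guava".toList ['C', ':', '2', '4', '#', 'F', ':', '1', '.', '6', '#', 'P', ':', '4', '.', '2', '#', 'K', ':', '1', '1', '0'] _ _ (by decide) rfl (by decide) (by decide) (by decide) (by decide)

lemma en25 (x : String) (hx : '#' ∉ x.toList) :
    PySem.Str.isIn ("#N:" ++ x ++ "#") "o#N:peach#C:15#F:0#P:1.4#K:70" = (x == "peach") :=
  entry_isIn x hx ['o'] "peach".toList ['C', ':', '1', '5', '#', 'F', ':', '0', '#', 'P', ':', '1', '.', '4', '#', 'K', ':', '7', '0'] _ _ (by decide) rfl (by decide) (by decide) (by decide) (by decide)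

lemma en26 (x : String) (hx : '#' ∉ x.toList) :
    PySem.Str.isIn ("#N:" ++ x ++ "#") "o#N:oranges#C:15#F:0.2#P:1.2#K:62" = (x == "oranges") :=
  entry_isIn x hx ['o'] "oranges".toList ['C', ':', '1', '5', '#', 'F', ':', '0', '.', '2', '#', 'P', ':', '1', '.', '2', '#', 'K', ':', '6', '2'] _ _ (by decide) rfl (by decide) (by decide) (by decide) (by decide)

lemma en27 (x : String) (hx : '#' ∉ x.toList) :
    PySem.Str.isIn ("#N:" ++ x ++ "#") "o#N:orangeJuice#C:28#F:0#P:1#K:110" = (x == "orangeJuice") :=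
  entry_isIn x hx ['o'] "orangeJuice".toList ['C', ':', '2', '8', '#', 'F', ':', '0', '#', 'P', ':', '1', '#', 'K', ':', '1', '1', '0'] _ _ (by decide) rfl (by decide) (by decide) (by decide) (by decide)

lemma en28 (x : String) (hx : '#' ∉ x.toList) :
    PySem.Str.isIn ("#N:" ++ x ++ "#") "b#N:avocado#C:4#F:15#P:2#K:168" = (x == "avocado") :=
  entry_isIn x hx ['b'] "avocado".toList ['C', ':', '4', '#', 'F', ':', '1', '5', '#', 'P', ':', '2', '#', 'K', ':', '1', '6', '8'] _ _ (by decide) rfl (by decide) (by decide) (by decide) (by decide)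


-- A's scan as an 'any' over the list
lemma scanA_eq_any (x : String) (l : List String) : scanA x l = l.any (fun s => x == getName s) := by
  induction l with
  | nil => simp [scanA]
  | cons s rest ih => cases h : (x == getName s) <;> simp [scanA, h, ih]

-- when x contains '#', A matches nothing (no extracted name contains '#')
lemma scanA_false (x : String) (l : List String) (hx : '#' ∈ x.toList)
    (h : ∀ s ∈ l, '#' ∉ (getName s).toList) : scanA x l = false := by
  induction l with
  | nil => simp [scanA]
  | cons s rest ih =>
    have hne : (x == getName s) = false := by
      rw [beq_eq_false_iff_ne]
      intro hEq
      rw [hEq] at hx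
      exact h s (by simp) hx
    simp only [scanA, hne, Bool.false_eq_true, if_false]
    exact ih (fun s hs => h s (List.mem_cons_of_mem _ hs))

-- the five per-category equalities: A's scan = B's substring test, given '#' ∉ x
lemma eqP (x : String) (hx : '#' ∉ x.toList) :
    scanA x protienSource = protienSource.any (fun e => PySem.Str.isIn ("#N:" ++ x ++ "#") e) := by
  simp only [scanA_eq_any, protienSource, List.any_cons, List.any_nil,
    gn1, gn2, gn3, gn4, gn5, gn6, gn7, gn8, gn9,
    en1 x hx, en2 x hx, en3 x hx, en4 x hx, en5 x hx, en6 x hx, en7 x hx, en8 x hx, en9 x hx]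
lemma eqF (x : String) (hx : '#' ∉ x.toList) :
    scanA x fatSource = fatSource.any (fun e => PySem.Str.isIn ("#N:" ++ x ++ "#") e) := by
  simp only [scanA_eq_any, fatSource, List.any_cons, List.any_nil,
    gn10, gn11, gn12, gn13, en10 x hx, en11 x hx, en12 x hx, en13 x hx]
lemma eqC (x : String) (hx : '#' ∉ x.toList) :
    scanA x carbSource = carbSource.any (fun e => PySem.Str.isIn ("#N:" ++ x ++ "#") e) := by
  simp only [scanA_eq_any, carbSource, List.any_cons, List.any_nil,
    gn14, gn15, gn16, gn17, gn18, en14 x hx, en15 x hx, en16 x hx, en17 x hx, en18 x hx]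
lemma eqV (x : String) (hx : '#' ∉ x.toList) :
    scanA x vegetables = vegetables.any (fun e => PySem.Str.isIn ("#N:" ++ x ++ "#") e) := by
  simp only [scanA_eq_any, vegetables, List.any_cons, List.any_nil,
    gn19, gn20, gn21, gn22, en19 x hx, en20 x hx, en21 x hx, en22 x hx]
lemma eqFr (x : String) (hx : '#' ∉ x.toList) :
    scanA x fruits = fruits.any (fun e => PySem.Str.isIn ("#N:" ++ x ++ "#") e) := by
  simp only [scanA_eq_any, fruits, List.any_cons, List.any_nil,
    gn23, gn24, gn25, gn26, gn27, gn28, en23 x hx, en24 x hx, en25 x hx, en26 x hx, en27 x hx, en28 x hx]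

-- A's chain tests the protein condition twice; the duplicate branch is redundant
lemma if_chain_dup (c1 c2 c3 c4 c5 : Bool) :
    (if c1 then "P" else if c2 then "F" else if c3 then "C" else if c1 then "P"
     else if c4 then "V" else if c5 then "Fr" else "X")
    = (if c1 then "P" else if c2 then "F" else if c3 then "C"
       else if c4 then "V" else if c5 then "Fr" else "X") := by
  cases c1 <;> simp

-- ===== VERDICT (by name: the statement is the Claim_ definition above) =====
theorem toXBelong_spec : Claim_equal_toXBelong := by
  unfold Claim_equal_toXBelong Spec_toXBelong
  intro x _
  by_cases hx : '#' ∈ x.toList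
  · -- x contains '#': both sides return "X"
    have hin : PySem.Str.isIn "#" x = true := by
      rw [PySem.Str.isIn_iff_infix]
      obtain ⟨s, t, h⟩ := List.append_of_mem hx
      rw [h]
      exact ⟨s, t, by simp⟩
    have p1 : scanA x protienSource = false := scanA_false x _ hx (by decide)
    have p2 : scanA x fatSource = false := scanA_false x _ hx (by decide)
    have p3 : scanA x carbSource = false := scanA_false x _ hx (by decide)
    have p4 : scanA x vegetables = false := scanA_false x _ hx (by decide)
    have p5 : scanA x fruits = false := scanA_false x _ hx (by decide)
    unfold toXBelong toXBelong_alt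
    rw [hin, p1, p2, p3, p4, p5]
    simp
  · -- x has no '#': both chains test the same per-category booleans
    have hin : PySem.Str.isIn "#" x = false := by
      rw [Bool.eq_false_iff]
      intro hcon
      exact hx (((PySem.Str.isIn_iff_infix _ _).mp hcon).subset (by simp))
    unfold toXBelong toXBelong_alt
    rw [hin]
    simp only [Bool.false_eq_true, if_false]
    simp only [scanCats, catList]
    rw [eqP x hx, eqF x hx, eqC x hx, eqV x hx, eqFr x hx]
    exact if_chain_dup _ _ _ _ _
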